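-- pv_equiv track=rewrite | github.com/rekab/CivicMesh | diagnostics/radio/tests/t3_repetition.py | _worst_verdict
-- ===== SOURCE A (Python) =====
-- def _worst_verdict(verdicts):
--     priority = [
--         "SENDER_SAYS_FAILED_BUT_RECIPIENT_RECEIVED",
--         "SENDER_SAYS_SENT_NOT_RECEIVED",
--         "INCONCLUSIVE",
--         "BOTH_AGREE_FAILED",
--         "BOTH_AGREE_SENT",
--         "REPORTED",
--     ]
--     present = set(verdicts)
--     for p in priority:
--         if p in present:
--             return p
--     return "UNKNOWN"
-- ===== SOURCE B (Python) =====
-- def _worst_verdict(verdicts):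
--     priority = [
--         "SENDER_SAYS_FAILED_BUT_RECIPIENT_RECEIVED",
--         "SENDER_SAYS_SENT_NOT_RECEIVED",
--         "INCONCLUSIVE",
--         "BOTH_AGREE_FAILED",
--         "BOTH_AGREE_SENT",
--         "REPORTED",
--     ]
--     rank = {p: i for i, p in enumerate(priority)}
--     best_rank = None
--     best = "UNKNOWN"
--     for v in verdicts:
--         r = rank.get(v)
--         if r is not None and (best_rank is None or r < best_rank):
--             best_rank = r
--             best = v
--     return best
-- ===== Notes on version B (the rewrite author's own statement) =====
-- stated objective: alternative
-- what changed: Instead of probing a set of the inputs once per entry of the fixed priority list, B builds a rank dict from the priority list and makes a single pass over the verdicts keeping the smallest-rank verdict seen (ties to the smaller rank), returning 'UNKNOWN' if none is known.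
import Mathlib
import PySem

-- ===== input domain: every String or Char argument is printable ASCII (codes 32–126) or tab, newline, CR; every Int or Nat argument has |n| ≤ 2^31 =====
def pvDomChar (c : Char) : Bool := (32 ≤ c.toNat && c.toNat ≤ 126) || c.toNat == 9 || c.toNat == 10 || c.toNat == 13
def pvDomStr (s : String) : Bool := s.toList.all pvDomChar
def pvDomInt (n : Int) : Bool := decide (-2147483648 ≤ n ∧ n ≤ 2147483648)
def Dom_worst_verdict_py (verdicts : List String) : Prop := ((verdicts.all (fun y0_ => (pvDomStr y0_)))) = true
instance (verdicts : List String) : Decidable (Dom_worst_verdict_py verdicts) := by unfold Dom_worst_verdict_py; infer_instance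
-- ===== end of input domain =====

-- B replaces A's scan of the fixed priority list (probing a set of the inputs) by a single
-- pass over the inputs with a rank table, keeping the best (smallest-rank) verdict seen;
-- objective: alternative decomposition, same asymptotic cost.

-- ===== PORT A =====
def pvPriorityA : List String :=
  ["SENDER_SAYS_FAILED_BUT_RECIPIENT_RECEIVED",
   "SENDER_SAYS_SENT_NOT_RECEIVED",
   "INCONCLUSIVE",
   "BOTH_AGREE_FAILED",
   "BOTH_AGREE_SENT",
   "REPORTED"]

-- the 'for p in priority: if p in present: return p' loop
def pvLoopA (present : PySem.Set String) : List String → String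
  | [] => "UNKNOWN"
  | p :: ps => if PySem.Set.contains present p then p else pvLoopA present ps

def worst_verdict_py (verdicts : List String) : String :=
  pvLoopA (PySem.Set.ofList verdicts) pvPriorityA

-- ===== PORT B =====
-- rank = {p: i for i, p in enumerate(priority)}
def pvRankB : PySem.Dict String Int :=
  (PySem.List.enumerate
    ["SENDER_SAYS_FAILED_BUT_RECIPIENT_RECEIVED",
     "SENDER_SAYS_SENT_NOT_RECEIVED",
     "INCONCLUSIVE",
     "BOTH_AGREE_FAILED",
     "BOTH_AGREE_SENT",
     "REPORTED"] 0).foldl (fun d ip => PySem.Dict.insert d ip.2 ip.1) (PySem.Dict.empty)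

-- one iteration of the 'for v in verdicts' loop, state = (best_rank, best)
def pvStepB (acc : Option Int × String) (v : String) : Option Int × String :=
  match PySem.Dict.get? pvRankB v with
  | none => acc
  | some r =>
    match acc.1 with
    | none => (some r, v)
    | some b => if r < b then (some r, v) else acc

def worst_verdict_py_alt (verdicts : List String) : String :=
  (verdicts.foldl pvStepB (none, "UNKNOWN")).2

-- ===== PRECONDITION & SPEC =====
def Spec_worst_verdict_py (verdicts : List String) (out : String) : Prop := out = worst_verdict_py_alt verdicts
instance (verdicts : List String) (out : String) : Decidable (Spec_worst_verdict_py verdicts out) := by unfold Spec_worst_verdict_py; infer_instance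

-- ===== CLAIM (what is proved, stated in full; the proofs are below) =====
def Claim_equal_worst_verdict_py : Prop := ∀ (verdicts : List String), Dom_worst_verdict_py verdicts → Spec_worst_verdict_py verdicts (worst_verdict_py verdicts)

-- ===== LEMMAS AND PROOFS =====

-- short names for the six priority strings (proof helpers)
def pvS0 : String := "SENDER_SAYS_FAILED_BUT_RECIPIENT_RECEIVED"
def pvS1 : String := "SENDER_SAYS_SENT_NOT_RECEIVED"
def pvS2 : String := "INCONCLUSIVE"
def pvS3 : String := "BOTH_AGREE_FAILED"
def pvS4 : String := "BOTH_AGREE_SENT"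
def pvS5 : String := "REPORTED"

-- priority string at rank i
def pvStr (i : Int) : String :=
  if i = 0 then pvS0 else if i = 1 then pvS1 else if i = 2 then pvS2
  else if i = 3 then pvS3 else if i = 4 then pvS4 else if i = 5 then pvS5 else "UNKNOWN"

-- least rank present in vs, strictly below the bound b
def pvLp (vs : List String) (b : Int) : Option Int :=
  if pvS0 ∈ vs ∧ 0 < b then some 0 else if pvS1 ∈ vs ∧ 1 < b then some 1
  else if pvS2 ∈ vs ∧ 2 < b then some 2 else if pvS3 ∈ vs ∧ 3 < b then some 3
  else if pvS4 ∈ vs ∧ 4 < b then some 4 else if pvS5 ∈ vs ∧ 5 < b then some 5 else none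

-- least rank present in vs
def pvLp0 (vs : List String) : Option Int :=
  if pvS0 ∈ vs then some 0 else if pvS1 ∈ vs then some 1
  else if pvS2 ∈ vs then some 2 else if pvS3 ∈ vs then some 3
  else if pvS4 ∈ vs then some 4 else if pvS5 ∈ vs then some 5 else none

lemma pvRk_eq (v : String) : PySem.Dict.get? pvRankB v =
    if pvS0 = v then some 0 else if pvS1 = v then some 1 else if pvS2 = v then some 2
    else if pvS3 = v then some 3 else if pvS4 = v then some 4 else if pvS5 = v then some 5
    else none := by
  have h : pvRankB = PySem.Dict.mk [(pvS0,0),(pvS1,1),(pvS2,2),(pvS3,3),(pvS4,4),(pvS5,5)] := by decide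
  rw [h]
  simp only [PySem.Dict.get?_mk_cons, beq_iff_eq, pvS0, pvS1, pvS2, pvS3, pvS4, pvS5]
  rfl

lemma pvContains_eq (vs : List String) (x : String) :
    PySem.Set.contains (PySem.Set.ofList vs) x = decide (x ∈ vs) := by
  simp [PySem.Set.contains, PySem.Set.mem_ofList]

lemma pvA_char (vs : List String) :
    worst_verdict_py vs = match pvLp0 vs with | none => "UNKNOWN" | some i => pvStr i := by
  simp only [worst_verdict_py, pvPriorityA, pvLoopA, pvContains_eq, decide_eq_true_eq, pvLp0,
    pvStr, pvS0, pvS1, pvS2, pvS3, pvS4, pvS5]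
  split_ifs <;> rfl

lemma pvStepB_eq (acc : Option Int × String) (v : String) : pvStepB acc v =
    match PySem.Dict.get? pvRankB v with
    | none => acc
    | some r => match acc.1 with
      | none => (some r, v)
      | some b => if r < b then (some r, v) else acc := rfl

lemma pvStepB_none {v : String} (h : PySem.Dict.get? pvRankB v = none)
    (acc : Option Int × String) : pvStepB acc v = acc := by
  rw [pvStepB_eq, h]

lemma pvStepB_some {v : String} {r : Int} (h : PySem.Dict.get? pvRankB v = some r)
    (b : Int) (s : String) :
    pvStepB (some b, s) v = if r < b then (some r, v) else (some b, s) := by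
  rw [pvStepB_eq, h]

lemma pvStepB_init {v : String} {r : Int} (h : PySem.Dict.get? pvRankB v = some r)
    (s : String) : pvStepB (none, s) v = (some r, v) := by
  rw [pvStepB_eq, h]

lemma pvRk0 : PySem.Dict.get? pvRankB pvS0 = some 0 := by decide

lemma pvRk1 : PySem.Dict.get? pvRankB pvS1 = some 1 := by decide

lemma pvRk2 : PySem.Dict.get? pvRankB pvS2 = some 2 := by decide

lemma pvRk3 : PySem.Dict.get? pvRankB pvS3 = some 3 := by decide

lemma pvRk4 : PySem.Dict.get? pvRankB pvS4 = some 4 := by decide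

lemma pvRk5 : PySem.Dict.get? pvRankB pvS5 = some 5 := by decide

lemma pvRkNone {v : String} (h0 : ¬ pvS0 = v) (h1 : ¬ pvS1 = v) (h2 : ¬ pvS2 = v)
    (h3 : ¬ pvS3 = v) (h4 : ¬ pvS4 = v) (h5 : ¬ pvS5 = v) :
    PySem.Dict.get? pvRankB v = none := by
  rw [pvRk_eq]
  simp [h0, h1, h2, h3, h4, h5]

lemma pvLpLt0 (vs : List String) (b : Int) (h : (0:Int) < b) :
    pvLp (pvS0 :: vs) b = match pvLp vs 0 with | none => some 0 | some i => some i := by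
  have e0 : ((0:Int) < b) = True := eq_true (by omega)
  simp only [pvLp, pvLp0, List.mem_cons, pvS0, pvS1, pvS2, pvS3, pvS4, pvS5, String.reduceEq, false_or, true_or, true_and, false_and, and_true, and_false, if_false, Int.reduceLT, e0]
  split_ifs <;> rfl

lemma pvLpGe0 (vs : List String) (b : Int) (h : ¬ (0:Int) < b) :
    pvLp (pvS0 :: vs) b = pvLp vs b := by
  have e0 : ((0:Int) < b) = False := eq_false (by omega)
  have e1 : ((1:Int) < b) = False := eq_false (by omega)
  have e2 : ((2:Int) < b) = False := eq_false (by omega)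
  have e3 : ((3:Int) < b) = False := eq_false (by omega)
  have e4 : ((4:Int) < b) = False := eq_false (by omega)
  have e5 : ((5:Int) < b) = False := eq_false (by omega)
  simp only [pvLp, pvLp0, List.mem_cons, pvS0, pvS1, pvS2, pvS3, pvS4, pvS5, String.reduceEq, false_or, true_or, true_and, false_and, and_true, and_false, if_false, Int.reduceLT, e0, e1, e2, e3, e4, e5]

lemma pvLp0Cons0 (vs : List String) :
    pvLp0 (pvS0 :: vs) = match pvLp vs 0 with | none => some 0 | some i => some i := by
  simp only [pvLp, pvLp0, List.mem_cons, pvS0, pvS1, pvS2, pvS3, pvS4, pvS5, String.reduceEq, false_or, true_or, true_and, false_and, and_true, and_false, if_false, Int.reduceLT]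
  split_ifs <;> rfl

lemma pvLpLt1 (vs : List String) (b : Int) (h : (1:Int) < b) :
    pvLp (pvS1 :: vs) b = match pvLp vs 1 with | none => some 1 | some i => some i := by
  have e0 : ((0:Int) < b) = True := eq_true (by omega)
  have e1 : ((1:Int) < b) = True := eq_true (by omega)
  simp only [pvLp, pvLp0, List.mem_cons, pvS0, pvS1, pvS2, pvS3, pvS4, pvS5, String.reduceEq, false_or, true_or, true_and, false_and, and_true, and_false, if_false, Int.reduceLT, e0, e1]
  split_ifs <;> rfl

lemma pvLpGe1 (vs : List String) (b : Int) (h : ¬ (1:Int) < b) :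
    pvLp (pvS1 :: vs) b = pvLp vs b := by
  have e1 : ((1:Int) < b) = False := eq_false (by omega)
  have e2 : ((2:Int) < b) = False := eq_false (by omega)
  have e3 : ((3:Int) < b) = False := eq_false (by omega)
  have e4 : ((4:Int) < b) = False := eq_false (by omega)
  have e5 : ((5:Int) < b) = False := eq_false (by omega)
  simp only [pvLp, pvLp0, List.mem_cons, pvS0, pvS1, pvS2, pvS3, pvS4, pvS5, String.reduceEq, false_or, true_or, true_and, false_and, and_true, and_false, if_false, Int.reduceLT, e1, e2, e3, e4, e5]

lemma pvLp0Cons1 (vs : List String) :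
    pvLp0 (pvS1 :: vs) = match pvLp vs 1 with | none => some 1 | some i => some i := by
  simp only [pvLp, pvLp0, List.mem_cons, pvS0, pvS1, pvS2, pvS3, pvS4, pvS5, String.reduceEq, false_or, true_or, true_and, false_and, and_true, and_false, if_false, Int.reduceLT]
  split_ifs <;> rfl

lemma pvLpLt2 (vs : List String) (b : Int) (h : (2:Int) < b) :
    pvLp (pvS2 :: vs) b = match pvLp vs 2 with | none => some 2 | some i => some i := by
  have e0 : ((0:Int) < b) = True := eq_true (by omega)
  have e1 : ((1:Int) < b) = True := eq_true (by omega)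
  have e2 : ((2:Int) < b) = True := eq_true (by omega)
  simp only [pvLp, pvLp0, List.mem_cons, pvS0, pvS1, pvS2, pvS3, pvS4, pvS5, String.reduceEq, false_or, true_or, true_and, false_and, and_true, and_false, if_false, Int.reduceLT, e0, e1, e2]
  split_ifs <;> rfl

lemma pvLpGe2 (vs : List String) (b : Int) (h : ¬ (2:Int) < b) :
    pvLp (pvS2 :: vs) b = pvLp vs b := by
  have e2 : ((2:Int) < b) = False := eq_false (by omega)
  have e3 : ((3:Int) < b) = False := eq_false (by omega)
  have e4 : ((4:Int) < b) = False := eq_false (by omega)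
  have e5 : ((5:Int) < b) = False := eq_false (by omega)
  simp only [pvLp, pvLp0, List.mem_cons, pvS0, pvS1, pvS2, pvS3, pvS4, pvS5, String.reduceEq, false_or, true_or, true_and, false_and, and_true, and_false, if_false, Int.reduceLT, e2, e3, e4, e5]

lemma pvLp0Cons2 (vs : List String) :
    pvLp0 (pvS2 :: vs) = match pvLp vs 2 with | none => some 2 | some i => some i := by
  simp only [pvLp, pvLp0, List.mem_cons, pvS0, pvS1, pvS2, pvS3, pvS4, pvS5, String.reduceEq, false_or, true_or, true_and, false_and, and_true, and_false, if_false, Int.reduceLT]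
  split_ifs <;> rfl

lemma pvLpLt3 (vs : List String) (b : Int) (h : (3:Int) < b) :
    pvLp (pvS3 :: vs) b = match pvLp vs 3 with | none => some 3 | some i => some i := by
  have e0 : ((0:Int) < b) = True := eq_true (by omega)
  have e1 : ((1:Int) < b) = True := eq_true (by omega)
  have e2 : ((2:Int) < b) = True := eq_true (by omega)
  have e3 : ((3:Int) < b) = True := eq_true (by omega)
  simp only [pvLp, pvLp0, List.mem_cons, pvS0, pvS1, pvS2, pvS3, pvS4, pvS5, String.reduceEq, false_or, true_or, true_and, false_and, and_true, and_false, if_false, Int.reduceLT, e0, e1, e2, e3]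
  split_ifs <;> rfl

lemma pvLpGe3 (vs : List String) (b : Int) (h : ¬ (3:Int) < b) :
    pvLp (pvS3 :: vs) b = pvLp vs b := by
  have e3 : ((3:Int) < b) = False := eq_false (by omega)
  have e4 : ((4:Int) < b) = False := eq_false (by omega)
  have e5 : ((5:Int) < b) = False := eq_false (by omega)
  simp only [pvLp, pvLp0, List.mem_cons, pvS0, pvS1, pvS2, pvS3, pvS4, pvS5, String.reduceEq, false_or, true_or, true_and, false_and, and_true, and_false, if_false, Int.reduceLT, e3, e4, e5]

lemma pvLp0Cons3 (vs : List String) :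
    pvLp0 (pvS3 :: vs) = match pvLp vs 3 with | none => some 3 | some i => some i := by
  simp only [pvLp, pvLp0, List.mem_cons, pvS0, pvS1, pvS2, pvS3, pvS4, pvS5, String.reduceEq, false_or, true_or, true_and, false_and, and_true, and_false, if_false, Int.reduceLT]
  split_ifs <;> rfl

lemma pvLpLt4 (vs : List String) (b : Int) (h : (4:Int) < b) :
    pvLp (pvS4 :: vs) b = match pvLp vs 4 with | none => some 4 | some i => some i := by
  have e0 : ((0:Int) < b) = True := eq_true (by omega)
  have e1 : ((1:Int) < b) = True := eq_true (by omega)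
  have e2 : ((2:Int) < b) = True := eq_true (by omega)
  have e3 : ((3:Int) < b) = True := eq_true (by omega)
  have e4 : ((4:Int) < b) = True := eq_true (by omega)
  simp only [pvLp, pvLp0, List.mem_cons, pvS0, pvS1, pvS2, pvS3, pvS4, pvS5, String.reduceEq, false_or, true_or, true_and, false_and, and_true, and_false, if_false, Int.reduceLT, e0, e1, e2, e3, e4]
  split_ifs <;> rfl

lemma pvLpGe4 (vs : List String) (b : Int) (h : ¬ (4:Int) < b) :
    pvLp (pvS4 :: vs) b = pvLp vs b := by
  have e4 : ((4:Int) < b) = False := eq_false (by omega)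
  have e5 : ((5:Int) < b) = False := eq_false (by omega)
  simp only [pvLp, pvLp0, List.mem_cons, pvS0, pvS1, pvS2, pvS3, pvS4, pvS5, String.reduceEq, false_or, true_or, true_and, false_and, and_true, and_false, if_false, Int.reduceLT, e4, e5]

lemma pvLp0Cons4 (vs : List String) :
    pvLp0 (pvS4 :: vs) = match pvLp vs 4 with | none => some 4 | some i => some i := by
  simp only [pvLp, pvLp0, List.mem_cons, pvS0, pvS1, pvS2, pvS3, pvS4, pvS5, String.reduceEq, false_or, true_or, true_and, false_and, and_true, and_false, if_false, Int.reduceLT]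
  split_ifs <;> rfl

lemma pvLpLt5 (vs : List String) (b : Int) (h : (5:Int) < b) :
    pvLp (pvS5 :: vs) b = match pvLp vs 5 with | none => some 5 | some i => some i := by
  have e0 : ((0:Int) < b) = True := eq_true (by omega)
  have e1 : ((1:Int) < b) = True := eq_true (by omega)
  have e2 : ((2:Int) < b) = True := eq_true (by omega)
  have e3 : ((3:Int) < b) = True := eq_true (by omega)
  have e4 : ((4:Int) < b) = True := eq_true (by omega)
  have e5 : ((5:Int) < b) = True := eq_true (by omega)
  simp only [pvLp, pvLp0, List.mem_cons, pvS0, pvS1, pvS2, pvS3, pvS4, pvS5, String.reduceEq, false_or, true_or, true_and, false_and, and_true, and_false, if_false, Int.reduceLT, e0, e1, e2, e3, e4, e5]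
  split_ifs <;> rfl

lemma pvLpGe5 (vs : List String) (b : Int) (h : ¬ (5:Int) < b) :
    pvLp (pvS5 :: vs) b = pvLp vs b := by
  have e5 : ((5:Int) < b) = False := eq_false (by omega)
  simp only [pvLp, pvLp0, List.mem_cons, pvS0, pvS1, pvS2, pvS3, pvS4, pvS5, String.reduceEq, false_or, true_or, true_and, false_and, and_true, and_false, if_false, Int.reduceLT, e5]

lemma pvLp0Cons5 (vs : List String) :
    pvLp0 (pvS5 :: vs) = match pvLp vs 5 with | none => some 5 | some i => some i := by
  simp only [pvLp, pvLp0, List.mem_cons, pvS0, pvS1, pvS2, pvS3, pvS4, pvS5, String.reduceEq, false_or, true_or, true_and, false_and, and_true, and_false, if_false, Int.reduceLT]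
  split_ifs <;> rfl

lemma pvLpNot {v : String} (h0 : ¬ pvS0 = v) (h1 : ¬ pvS1 = v) (h2 : ¬ pvS2 = v)
    (h3 : ¬ pvS3 = v) (h4 : ¬ pvS4 = v) (h5 : ¬ pvS5 = v) (vs : List String) (b : Int) :
    pvLp (v :: vs) b = pvLp vs b := by
  simp only [pvLp, List.mem_cons, h0, h1, h2, h3, h4, h5, false_or]

lemma pvLp0Not {v : String} (h0 : ¬ pvS0 = v) (h1 : ¬ pvS1 = v) (h2 : ¬ pvS2 = v)
    (h3 : ¬ pvS3 = v) (h4 : ¬ pvS4 = v) (h5 : ¬ pvS5 = v) (vs : List String) :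
    pvLp0 (v :: vs) = pvLp0 vs := by
  simp only [pvLp0, List.mem_cons, h0, h1, h2, h3, h4, h5, false_or]

lemma pvFold1 (vs : List String) (b : Int) (s : String) :
    List.foldl pvStepB (some b, s) vs =
      match pvLp vs b with | none => (some b, s) | some i => (some i, pvStr i) := by
  induction vs generalizing b s with
  | nil => simp [pvLp]
  | cons v vs ih =>
    rw [List.foldl_cons]
    by_cases c0 : pvS0 = v
    · subst c0
      rw [pvStepB_some pvRk0]
      split_ifs with hb
      · rw [ih, pvLpLt0 vs b hb]
        cases pvLp vs 0 <;> rfl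
      · rw [ih, pvLpGe0 vs b hb]
    · -- v is not pvS0
      by_cases c1 : pvS1 = v
      · subst c1
        rw [pvStepB_some pvRk1]
        split_ifs with hb
        · rw [ih, pvLpLt1 vs b hb]
          cases pvLp vs 1 <;> rfl
        · rw [ih, pvLpGe1 vs b hb]
      · -- v is not pvS1
        by_cases c2 : pvS2 = v
        · subst c2
          rw [pvStepB_some pvRk2]
          split_ifs with hb
          · rw [ih, pvLpLt2 vs b hb]
            cases pvLp vs 2 <;> rfl
          · rw [ih, pvLpGe2 vs b hb]
        · -- v is not pvS2
          by_cases c3 : pvS3 = v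
          · subst c3
            rw [pvStepB_some pvRk3]
            split_ifs with hb
            · rw [ih, pvLpLt3 vs b hb]
              cases pvLp vs 3 <;> rfl
            · rw [ih, pvLpGe3 vs b hb]
          · -- v is not pvS3
            by_cases c4 : pvS4 = v
            · subst c4
              rw [pvStepB_some pvRk4]
              split_ifs with hb
              · rw [ih, pvLpLt4 vs b hb]
                cases pvLp vs 4 <;> rfl
              · rw [ih, pvLpGe4 vs b hb]
            · -- v is not pvS4
              by_cases c5 : pvS5 = v
              · subst c5
                rw [pvStepB_some pvRk5]
                split_ifs with hb
                · rw [ih, pvLpLt5 vs b hb]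
                  cases pvLp vs 5 <;> rfl
                · rw [ih, pvLpGe5 vs b hb]
              · rw [pvStepB_none (pvRkNone c0 c1 c2 c3 c4 c5), ih, pvLpNot c0 c1 c2 c3 c4 c5]

lemma pvFold0 (vs : List String) :
    List.foldl pvStepB (none, "UNKNOWN") vs =
      match pvLp0 vs with | none => (none, "UNKNOWN") | some i => (some i, pvStr i) := by
  induction vs with
  | nil => simp [pvLp0]
  | cons v vs ih =>
    rw [List.foldl_cons]
    by_cases c0 : pvS0 = v
    · subst c0
      rw [pvStepB_init pvRk0, pvFold1, pvLp0Cons0]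
      cases pvLp vs 0 <;> rfl
    · -- v is not pvS0
      by_cases c1 : pvS1 = v
      · subst c1
        rw [pvStepB_init pvRk1, pvFold1, pvLp0Cons1]
        cases pvLp vs 1 <;> rfl
      · -- v is not pvS1
        by_cases c2 : pvS2 = v
        · subst c2
          rw [pvStepB_init pvRk2, pvFold1, pvLp0Cons2]
          cases pvLp vs 2 <;> rfl
        · -- v is not pvS2
          by_cases c3 : pvS3 = v
          · subst c3
            rw [pvStepB_init pvRk3, pvFold1, pvLp0Cons3]
            cases pvLp vs 3 <;> rfl
          · -- v is not pvS3
            by_cases c4 : pvS4 = v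
            · subst c4
              rw [pvStepB_init pvRk4, pvFold1, pvLp0Cons4]
              cases pvLp vs 4 <;> rfl
            · -- v is not pvS4
              by_cases c5 : pvS5 = v
              · subst c5
                rw [pvStepB_init pvRk5, pvFold1, pvLp0Cons5]
                cases pvLp vs 5 <;> rfl
              · rw [pvStepB_none (pvRkNone c0 c1 c2 c3 c4 c5), ih, pvLp0Not c0 c1 c2 c3 c4 c5]

-- ===== VERDICT (by name: the statement is the Claim_ definition above) =====
theorem worst_verdict_py_spec : Claim_equal_worst_verdict_py := by
  intro vs _
  unfold Spec_worst_verdict_py worst_verdict_py_alt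
  rw [pvFold0, pvA_char]
  cases pvLp0 vs <;> rfl
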